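-- pv_equiv track=rewrite | github.com/merlijntishauser/unifi-homelab-ops | backend/app/services/analyzer.py | _ports_cover
-- ===== SOURCE A (Python) =====
-- def _parse_port_constraint(port_range: str) -> tuple[int, int] | None:
--     normalized = port_range.strip()
--     if not normalized:
--         return None
--     if "-" not in normalized:
--         try:
--             port = int(normalized)
--         except ValueError:
--             return None
--         return (port, port)
--     low_raw, high_raw = normalized.split("-", 1)
--     try:
--         low = int(low_raw)
--         high = int(high_raw)
--     except ValueError:
--         return None
--     if low > high:
--         return None
--     return (low, high)
--
-- def _ports_cover(earlier: list[str], later: list[str]) -> bool: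
--     if not earlier:
--         return True
--     if not later:
--         return False
--
--     parsed_earlier = [_parse_port_constraint(port) for port in earlier]
--     parsed_later = [_parse_port_constraint(port) for port in later]
--     if any(port is None for port in parsed_earlier + parsed_later):
--         return False
--
--     earlier_ranges = [port for port in parsed_earlier if port is not None]
--     later_ranges = [port for port in parsed_later if port is not None]
--     return all(
--         any(
--             earlier_low <= later_low and later_high <= earlier_high
--             for earlier_low, earlier_high in earlier_ranges
--         )
--         for later_low, later_high in later_ranges
--     )
-- ===== SOURCE B (Python) =====
-- def _parse_port_constraint(port_range):
--     normalized = port_range.strip()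
--     if not normalized:
--         return None
--     if "-" not in normalized:
--         try:
--             port = int(normalized)
--         except ValueError:
--             return None
--         return (port, port)
--     low_raw, high_raw = normalized.split("-", 1)
--     try:
--         low = int(low_raw)
--         high = int(high_raw)
--     except ValueError:
--         return None
--     if low > high:
--         return None
--     return (low, high)
--
--
-- def _ports_cover(earlier, later):
--     # Sort both sides by range low, then sweep once with a running max of the
--     # earlier highs reaching each later low.
--     if not earlier:
--         return True
--     if not later:
--         return False
--     parsed_earlier = [_parse_port_constraint(p) for p in earlier]
--     parsed_later = [_parse_port_constraint(p) for p in later]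
--     if any(p is None for p in parsed_earlier) or any(p is None for p in parsed_later):
--         return False
--     es = sorted(parsed_earlier, key=lambda r: r[0])
--     ls = sorted(parsed_later, key=lambda r: r[0])
--     i = 0
--     best = None
--     for lo, hi in ls:
--         while i < len(es) and es[i][0] <= lo:
--             h = es[i][1]
--             best = h if best is None else max(best, h)
--             i += 1
--         if best is None or best < hi:
--             return False
--     return True
-- ===== Notes on version B (the rewrite author's own statement) =====
-- stated objective: alternative
-- what changed: Replaces A's nested scan (each later range tested against every earlier range) by sorting both parsed lists by range low and doing one merge sweep that maintains the running maximum of earlier highs reaching each later low.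
import Mathlib
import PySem

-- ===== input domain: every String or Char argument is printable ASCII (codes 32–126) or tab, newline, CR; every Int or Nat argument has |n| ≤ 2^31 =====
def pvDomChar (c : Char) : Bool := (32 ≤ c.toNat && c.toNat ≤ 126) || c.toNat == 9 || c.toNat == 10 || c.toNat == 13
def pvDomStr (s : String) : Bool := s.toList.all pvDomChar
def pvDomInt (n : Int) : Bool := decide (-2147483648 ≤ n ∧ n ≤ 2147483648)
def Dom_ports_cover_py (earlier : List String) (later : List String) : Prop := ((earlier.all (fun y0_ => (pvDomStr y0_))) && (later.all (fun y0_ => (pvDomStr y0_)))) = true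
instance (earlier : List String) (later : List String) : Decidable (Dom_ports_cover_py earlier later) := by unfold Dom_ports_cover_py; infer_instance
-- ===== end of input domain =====

-- B replaces A's nested scan (each later range tested against every earlier range) by
-- sort-both-by-low + one merge sweep with a running max of earlier highs (alternative algorithm).


-- ===== PORT A =====
-- shared helper _parse_port_constraint (identical in both Pythons)
def parsePortConstraint (portRange : String) : Option (Int × Int) :=
  let normalized := PySem.Str.strip portRange
  if normalized = "" then none
  else if ¬ (PySem.Str.isIn "-" normalized = true) then
    match PySem.Int.ofStr? normalized with
    | none => none
    | some port => some (port, port)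
  else
    match PySem.Str.splitMax? normalized "-" 1 with
    | some [lowRaw, highRaw] =>
      match PySem.Int.ofStr? lowRaw, PySem.Int.ofStr? highRaw with
      | some low, some high => if low > high then none else some (low, high)
      | _, _ => none
    | _ => none  -- unreachable: split("-", 1) with "-" present yields exactly two pieces

def ports_cover_py (earlier : List String) (later : List String) : Bool :=
  if earlier = [] then true
  else if later = [] then false
  else
    let parsedEarlier := earlier.map parsePortConstraint
    let parsedLater := later.map parsePortConstraint
    if (parsedEarlier ++ parsedLater).any (fun p => p.isNone) then false
    else
      let earlierRanges := parsedEarlier.filterMap (fun p => p)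
      let laterRanges := parsedLater.filterMap (fun p => p)
      laterRanges.all (fun q =>
        earlierRanges.any (fun p => decide (p.1 ≤ q.1) && decide (q.2 ≤ p.2)))

-- ===== PORT B =====
-- running max accumulator: best = h if best is None else max(best, h)
def maxStep (best : Option Int) (h : Int) : Option Int :=
  some (match best with | none => h | some b => max b h)

-- inner while loop: advance through the earlier ranges whose low ≤ lo (the pointer i
-- is modelled as the remaining suffix), folding their highs into best
def consumeLe (lo : Int) : List (Int × Int) → Option Int → List (Int × Int) × Option Int
  | [], best => ([], best)
  | (l, h) :: es, best =>
    if l ≤ lo then consumeLe lo es (maxStep best h)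
    else ((l, h) :: es, best)

-- the for loop over the sorted later ranges
def sweep : List (Int × Int) → List (Int × Int) → Option Int → Bool
  | [], _, _ => true
  | (lo, hi) :: ls, es, best =>
    let r := consumeLe lo es best
    match r.2 with
    | none => false
    | some b => if b < hi then false else sweep ls r.1 r.2

def ports_cover_py_alt (earlier : List String) (later : List String) : Bool :=
  if earlier = [] then true
  else if later = [] then false
  else
    let parsedEarlier := earlier.map parsePortConstraint
    let parsedLater := later.map parsePortConstraint
    if parsedEarlier.any (fun p => p.isNone) || parsedLater.any (fun p => p.isNone) then false
    else
      let es := PySem.List.sorted (parsedEarlier.filterMap (fun p => p)) (fun r => r.1) false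
      let ls := PySem.List.sorted (parsedLater.filterMap (fun p => p)) (fun r => r.1) false
      sweep ls es none

-- ===== PRECONDITION & SPEC =====
def Spec_ports_cover_py (earlier : List String) (later : List String) (out : Bool) : Prop := out = ports_cover_py_alt earlier later
instance (earlier : List String) (later : List String) (out : Bool) : Decidable (Spec_ports_cover_py earlier later out) := by unfold Spec_ports_cover_py; infer_instance

-- ===== CLAIM (what is proved, stated in full; the proofs are below) =====
def Claim_equal_ports_cover_py : Prop := ∀ (earlier : List String) (later : List String), Dom_ports_cover_py earlier later → Spec_ports_cover_py earlier later (ports_cover_py earlier later)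

-- ===== LEMMAS AND PROOFS =====

-- best after folding a run of ranges
def bestFold (l : List (Int × Int)) (b : Option Int) : Option Int :=
  l.foldl (fun b p => maxStep b p.2) b

lemma consumeLe_eq (lo : Int) (es : List (Int × Int)) (best : Option Int) :
    consumeLe lo es best =
      (es.dropWhile (fun p => decide (p.1 ≤ lo)),
       bestFold (es.takeWhile (fun p => decide (p.1 ≤ lo))) best) := by
  induction es generalizing best with
  | nil => rfl
  | cons p t ih =>
    obtain ⟨l, h⟩ := p
    by_cases hl : l ≤ lo <;>
      simp [consumeLe, bestFold, List.dropWhile, List.takeWhile, hl, ih]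

lemma bestFold_ge_iff (l : List (Int × Int)) (b : Option Int) (hi : Int) :
    (∃ m, bestFold l b = some m ∧ hi ≤ m) ↔
      (∃ p ∈ l, hi ≤ p.2) ∨ (∃ m, b = some m ∧ hi ≤ m) := by
  induction l generalizing b with
  | nil => simp [bestFold]
  | cons p t ih =>
    rw [show bestFold (p :: t) b = bestFold t (maxStep b p.2) from rfl, ih]
    cases b <;> simp [maxStep]
    · exact or_comm
    · constructor
      · rintro (h | h | h)
        · exact Or.inl (Or.inr h)
        · exact Or.inr h
        · exact Or.inl (Or.inl h)
      · rintro ((h | h) | h)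
        · exact Or.inr (Or.inr h)
        · exact Or.inl h
        · exact Or.inr (Or.inl h)

lemma not_le_of_mem_dropWhile (lo : Int) (es : List (Int × Int))
    (hs : es.Pairwise (fun a b => a.1 ≤ b.1))
    {p : Int × Int} (hp : p ∈ es.dropWhile (fun p => decide (p.1 ≤ lo))) :
    ¬ p.1 ≤ lo := by
  induction es with
  | nil => simp [List.dropWhile] at hp
  | cons q t ih =>
    rw [List.dropWhile] at hp
    by_cases hq : q.1 ≤ lo
    · simp [hq] at hp
      exact ih (List.Pairwise.of_cons hs) hp
    · simp [hq] at hp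
      rcases hp with rfl | hp
      · exact hq
      · have := (List.pairwise_cons.mp hs).1 p hp
        omega

lemma sweep_eq (ls : List (Int × Int)) :
    ∀ (done es : List (Int × Int)) (best : Option Int),
    es.Pairwise (fun a b => a.1 ≤ b.1) →
    ls.Pairwise (fun a b => a.1 ≤ b.1) →
    (∀ p ∈ done, ∀ q ∈ ls, p.1 ≤ q.1) →
    best = bestFold done none →
    sweep ls es best =
      ls.all (fun q => (done ++ es).any (fun p => decide (p.1 ≤ q.1) && decide (q.2 ≤ p.2))) := by
  induction ls with
  | nil => intros; rfl
  | cons q ls ih =>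
    intro done es best h1 h2 h3 h4
    obtain ⟨lo, hi⟩ := q
    set tw := es.takeWhile (fun p => decide (p.1 ≤ lo)) with htw
    set dw := es.dropWhile (fun p => decide (p.1 ≤ lo)) with hdw
    have hsplit : tw ++ dw = es := List.takeWhile_append_dropWhile
    have hbest2 : bestFold tw best = bestFold (done ++ tw) none := by
      rw [h4]; simp [bestFold, List.foldl_append]
    -- membership characterisation of done ++ tw
    have hmemle : ∀ p ∈ done ++ tw, p.1 ≤ lo := by
      intro p hp
      rcases List.mem_append.mp hp with hp | hp
      · exact h3 p hp (lo, hi) (List.mem_cons_self)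
      · have := List.mem_takeWhile_imp hp
        simpa using this
    have hmemF : ∀ p ∈ done ++ tw, p ∈ done ++ es := by
      intro p hp
      rcases List.mem_append.mp hp with hp | hp
      · exact List.mem_append.mpr (Or.inl hp)
      · exact List.mem_append.mpr (Or.inr (by rw [← hsplit]; exact List.mem_append.mpr (Or.inl hp)))
    have hcover : (∃ p ∈ done ++ tw, hi ≤ p.2) ↔
        (∃ p ∈ done ++ es, p.1 ≤ lo ∧ hi ≤ p.2) := by
      constructor
      · rintro ⟨p, hp, hge⟩
        exact ⟨p, hmemF p hp, hmemle p hp, hge⟩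
      · rintro ⟨p, hp, hle, hge⟩
        rcases List.mem_append.mp hp with hp | hp
        · exact ⟨p, List.mem_append.mpr (Or.inl hp), hge⟩
        · rw [← hsplit] at hp
          rcases List.mem_append.mp hp with hp | hp
          · exact ⟨p, List.mem_append.mpr (Or.inr hp), hge⟩
          · exact absurd hle (not_le_of_mem_dropWhile lo es h1 hp)
    have hhead : (∃ m, bestFold (done ++ tw) none = some m ∧ hi ≤ m) ↔
        (∃ p ∈ done ++ es, p.1 ≤ lo ∧ hi ≤ p.2) := by
      rw [bestFold_ge_iff]
      constructor
      · rintro (h | ⟨m, hm, _⟩)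
        · exact hcover.mp h
        · exact absurd hm (by simp)
      · intro h; exact Or.inl (hcover.mpr h)
    rw [show sweep ((lo, hi) :: ls) es best =
        (let r := consumeLe lo es best
         match r.2 with
         | none => false
         | some b => if b < hi then false else sweep ls r.1 r.2) from rfl]
    rw [consumeLe_eq, ← htw, ← hdw]
    rw [hbest2]
    rw [List.all_cons]
    have hheadB : (done ++ es).any (fun p => decide (p.1 ≤ (lo, hi).1) && decide ((lo, hi).2 ≤ p.2)) =
        decide (∃ p ∈ done ++ es, p.1 ≤ lo ∧ hi ≤ p.2) := by
      rw [Bool.eq_iff_iff]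
      simp only [List.any_eq_true, decide_eq_true_iff, Bool.and_eq_true]
    cases hb : bestFold (done ++ tw) none with
    | none =>
      have hno : ¬ (∃ p ∈ done ++ es, p.1 ≤ lo ∧ hi ≤ p.2) := by
        intro hcon
        obtain ⟨m, hm, _⟩ := hhead.mpr hcon
        rw [hb] at hm; simp at hm
      rw [hheadB, decide_eq_false hno, Bool.false_and]
    | some b =>
      rw [hheadB]
      change (if b < hi then false else sweep ls dw (some b)) = _
      by_cases hlt : b < hi
      · have hno : ¬ (∃ p ∈ done ++ es, p.1 ≤ lo ∧ hi ≤ p.2) := by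
          intro hcon
          obtain ⟨m, hm, hge⟩ := hhead.mpr hcon
          rw [hb] at hm
          injection hm with hm; omega
        rw [decide_eq_false hno, Bool.false_and, if_pos hlt]
      · have hyes : (∃ p ∈ done ++ es, p.1 ≤ lo ∧ hi ≤ p.2) :=
          hhead.mp ⟨b, hb, by omega⟩
        rw [if_neg hlt, decide_eq_true hyes, Bool.true_and]
        rw [ih (done ++ tw) dw (some b)]
        · congr 1
          funext q
          congr 1
          rw [List.append_assoc, hsplit]
        · exact List.Pairwise.sublist (List.dropWhile_sublist _) h1
        · exact List.Pairwise.of_cons h2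
        · intro p hp q hq
          have h1p : p.1 ≤ lo := hmemle p hp
          have h2q : lo ≤ q.1 := (List.pairwise_cons.mp h2).1 q hq
          omega
        · rw [hb]

lemma perm_all {l₁ l₂ : List (Int × Int)} (h : l₁.Perm l₂) (f : Int × Int → Bool) :
    l₁.all f = l₂.all f := by
  rw [Bool.eq_iff_iff, List.all_eq_true, List.all_eq_true]
  exact ⟨fun ha x hx => ha x (h.mem_iff.mpr hx), fun ha x hx => ha x (h.mem_iff.mp hx)⟩

lemma perm_any {l₁ l₂ : List (Int × Int)} (h : l₁.Perm l₂) (f : Int × Int → Bool) :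
    l₁.any f = l₂.any f := by
  rw [Bool.eq_iff_iff, List.any_eq_true, List.any_eq_true]
  exact ⟨fun ⟨x, hx, hf⟩ => ⟨x, h.mem_iff.mp hx, hf⟩, fun ⟨x, hx, hf⟩ => ⟨x, h.mem_iff.mpr hx, hf⟩⟩

lemma all_congr_mem {α : Type} {l : List α} {f g : α → Bool}
    (h : ∀ x ∈ l, f x = g x) : l.all f = l.all g := by
  induction l with
  | nil => rfl
  | cons x t ih =>
    simp only [List.all_cons, h x (List.mem_cons_self),
      ih (fun y hy => h y (List.mem_cons_of_mem _ hy))]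

-- ===== VERDICT (by name: the statement is the Claim_ definition above) =====
theorem ports_cover_py_spec : Claim_equal_ports_cover_py := by
  intro earlier later _
  unfold Spec_ports_cover_py ports_cover_py ports_cover_py_alt
  by_cases he : earlier = []
  · simp [he]
  · by_cases hl : later = []
    · simp [he, hl]
    · simp only [he, hl, if_false]
      rw [List.any_append]
      by_cases hnone : ((earlier.map parsePortConstraint).any (fun p => p.isNone) ||
          (later.map parsePortConstraint).any (fun p => p.isNone)) = true
      · rw [if_pos hnone]; rw [if_pos hnone]
      · simp only [hnone]
        set eR := (earlier.map parsePortConstraint).filterMap (fun p => p) with heR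
        set lR := (later.map parsePortConstraint).filterMap (fun p => p) with hlR
        set es := PySem.List.sorted eR (fun r => r.1) false with hes
        set ls := PySem.List.sorted lR (fun r => r.1) false with hls
        rw [sweep_eq ls [] es none
          (PySem.List.sorted_pairwise eR (fun r => r.1))
          (PySem.List.sorted_pairwise lR (fun r => r.1))
          (by intro p hp; simp at hp)
          rfl]
        simp only [List.nil_append]
        rw [perm_all (PySem.List.sorted_perm lR (fun r => r.1) false)]
        exact all_congr_mem (fun q _ =>
          (perm_any (PySem.List.sorted_perm eR (fun r => r.1) false) _).symm)
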